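-- pv_equiv track=rewrite | github.com/MrQwerties/CambridgeDynamics | replay_reader.py | clean_board
-- ===== SOURCE A (Python) =====
-- def clean_board(board):
--     result = []
--     for col in board:
--         ghost = False
--         new_col = []
--         for i in col:
--             if i == -1:
--                 ghost = True
--             if ghost:
--                 new_col.append(0)
--             else:
--                 new_col.append(i)
--         result.append(new_col)
--     return result
-- ===== SOURCE B (Python) =====
-- def clean_board(board):
--     result = []
--     for col in board:
--         if -1 in col:
--             idx = col.index(-1)
--             result.append(list(col[:idx]) + [0] * (len(col) - idx))
--         else:
--             result.append(list(col))
--     return result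
-- ===== Notes on version B (the rewrite author's own statement) =====
-- stated objective: simpler
-- what changed: Replaces the per-cell ghost-flag state machine with a find-split decomposition: locate the first -1 with col.index, keep the prefix before it and fill the rest with zeros.
import Mathlib
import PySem

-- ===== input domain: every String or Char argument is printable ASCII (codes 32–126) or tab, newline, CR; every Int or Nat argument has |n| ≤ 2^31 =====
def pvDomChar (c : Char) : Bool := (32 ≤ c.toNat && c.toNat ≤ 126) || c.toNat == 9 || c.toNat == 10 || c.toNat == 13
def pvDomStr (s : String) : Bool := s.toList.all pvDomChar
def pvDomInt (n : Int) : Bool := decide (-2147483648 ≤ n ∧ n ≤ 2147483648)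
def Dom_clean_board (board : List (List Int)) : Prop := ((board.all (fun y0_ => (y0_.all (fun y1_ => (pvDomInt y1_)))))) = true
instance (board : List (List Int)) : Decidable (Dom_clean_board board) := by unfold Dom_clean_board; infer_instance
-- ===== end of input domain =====

-- B replaces A's per-cell ghost-flag state machine by a find-split decomposition (simpler); return value only, no mutation.

-- ===== PORT A =====
-- inner loop of A: state (ghost, new_col), each cell appended as 0 or itself
def stepA (st : Bool × List Int) (i : Int) : Bool × List Int :=
  let ghost := if i == -1 then true else st.1
  (ghost, st.2 ++ [if ghost then (0 : Int) else i])

def cleanColA (col : List Int) : Bool × List Int :=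
  col.foldl stepA (false, [])

def clean_board (board : List (List Int)) : List (List Int) :=
  board.foldl (fun result col => result ++ [(cleanColA col).2]) []

-- ===== PORT B =====
-- B's column: find first -1, keep the prefix before it, fill the rest with zeros
def cleanColB (col : List Int) : List Int :=
  match PySem.List.index? col (-1) with
  | some idx => PySem.List.slice col (some 0) (some (idx : Int)) ++ List.replicate (col.length - idx) 0
  | none => col

def clean_board_alt (board : List (List Int)) : List (List Int) :=
  board.foldl (fun result col => result ++ [cleanColB col]) []

-- ===== PRECONDITION & SPEC =====
def Spec_clean_board (board : List (List Int)) (out : List (List Int)) : Prop := out = clean_board_alt board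
instance (board : List (List Int)) (out : List (List Int)) : Decidable (Spec_clean_board board out) := by unfold Spec_clean_board; infer_instance

-- ===== CLAIM (what is proved, stated in full; the proofs are below) =====
def Claim_equal_clean_board : Prop := ∀ (board : List (List Int)), Dom_clean_board board → Spec_clean_board board (clean_board board)

-- ===== LEMMAS AND PROOFS =====

-- reference column result, used only in the proof
def cleanSpec : List Int → List Int
  | [] => []
  | x :: xs => if x = -1 then 0 :: List.replicate xs.length 0 else x :: cleanSpec xs

lemma foldA_true (col : List Int) (acc : List Int) :
    col.foldl stepA (true, acc) = (true, acc ++ List.replicate col.length 0) := by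
  induction col generalizing acc with
  | nil => simp
  | cons x xs ih =>
    have h1 : stepA (true, acc) x = (true, acc ++ [0]) := by
      by_cases h : x = -1 <;> simp [stepA, h]
    rw [List.foldl_cons, h1, ih]
    simp [List.replicate_succ]

lemma foldA_false (col : List Int) (acc : List Int) :
    (col.foldl stepA (false, acc)).2 = acc ++ cleanSpec col := by
  induction col generalizing acc with
  | nil => simp [cleanSpec]
  | cons x xs ih =>
    by_cases hx : x = -1
    · subst hx
      have h1 : stepA (false, acc) (-1) = (true, acc ++ [0]) := by simp [stepA]
      rw [List.foldl_cons, h1, foldA_true]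
      simp [cleanSpec]
    · have h1 : stepA (false, acc) x = (false, acc ++ [x]) := by simp [stepA, hx]
      rw [List.foldl_cons, h1, ih]
      simp [cleanSpec, hx]

lemma cleanColA_eq_spec (col : List Int) : (cleanColA col).2 = cleanSpec col := by
  unfold cleanColA
  rw [foldA_false]
  rfl

lemma cleanSpec_no (xs : List Int) (h : (-1 : Int) ∉ xs) : cleanSpec xs = xs := by
  induction xs with
  | nil => rfl
  | cons x xs ih =>
    simp only [List.mem_cons, not_or] at h
    simp [cleanSpec, Ne.symm h.1, ih h.2]

lemma cleanSpec_split (pre suf : List Int) (h : (-1 : Int) ∉ pre) :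
    cleanSpec (pre ++ -1 :: suf) = pre ++ 0 :: List.replicate suf.length 0 := by
  induction pre with
  | nil => simp [cleanSpec]
  | cons p ps ih =>
    simp only [List.mem_cons, not_or] at h
    simp [cleanSpec, Ne.symm h.1, ih h.2]

lemma cleanColB_eq_spec (col : List Int) : cleanColB col = cleanSpec col := by
  unfold cleanColB
  cases hidx : PySem.List.index? col (-1) with
  | none =>
    simp only [hidx]
    rw [cleanSpec_no col ((PySem.List.index?_eq_none_iff col (-1)).mp hidx)]
  | some k =>
    simp only [hidx]
    obtain ⟨pre, suf, hcol, hlen, hpre⟩ := (PySem.List.index?_eq_some_iff col (-1) k).mp hidx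
    subst hcol
    subst hlen
    rw [PySem.List.slice_zero_start, PySem.List.slice_to_natCast, cleanSpec_split _ _ hpre]
    have hlen2 : (pre ++ -1 :: suf).length - pre.length = suf.length + 1 := by
      simp
    rw [List.take_left, hlen2, List.replicate_succ]

lemma cleanCols_eq (col : List Int) : (cleanColA col).2 = cleanColB col := by
  rw [cleanColA_eq_spec, cleanColB_eq_spec]

lemma foldl_app (board : List (List Int)) (f : List Int → List Int) (acc : List (List Int)) :
    board.foldl (fun result col => result ++ [f col]) acc = acc ++ board.map f := by
  induction board generalizing acc with
  | nil => simp
  | cons c cs ih => simp [ih]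

-- ===== VERDICT (by name: the statement is the Claim_ definition above) =====
theorem clean_board_spec : Claim_equal_clean_board := by
  intro board _
  unfold Spec_clean_board clean_board clean_board_alt
  rw [foldl_app board (fun col => (cleanColA col).2) [],
      foldl_app board cleanColB []]
  simp only [List.nil_append]
  exact List.map_congr_left (fun col _ => cleanCols_eq col)
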